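-- pv_equiv track=rewrite | github.com/dxhxy1983/Python | PTA/我要通过.py | juge1
-- ===== SOURCE A (Python) =====
-- def juge1(letters):#判断是否有P，A，T之外字符
--     dic={'P','A','T'}
--     if 'P' in letters and 'A' in letters and 'T' in letters:#判断是否有P，A，T字符
--         for i in range(len(letters)):
--             if letters[i] not in dic:
--                  return False
--             elif i==len(letters)-1 :
--                  return True
--     else :
--         return False
-- ===== SOURCE B (Python) =====
-- def juge1(letters):
--     return set(letters) == {'P', 'A', 'T'}
-- ===== Notes on version B (the rewrite author's own statement) =====
-- stated objective: simpler
-- what changed: Replaces the three substring presence checks plus the index loop with building the set of distinct characters once and comparing it for equality with {'P','A','T'}.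
import Mathlib
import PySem

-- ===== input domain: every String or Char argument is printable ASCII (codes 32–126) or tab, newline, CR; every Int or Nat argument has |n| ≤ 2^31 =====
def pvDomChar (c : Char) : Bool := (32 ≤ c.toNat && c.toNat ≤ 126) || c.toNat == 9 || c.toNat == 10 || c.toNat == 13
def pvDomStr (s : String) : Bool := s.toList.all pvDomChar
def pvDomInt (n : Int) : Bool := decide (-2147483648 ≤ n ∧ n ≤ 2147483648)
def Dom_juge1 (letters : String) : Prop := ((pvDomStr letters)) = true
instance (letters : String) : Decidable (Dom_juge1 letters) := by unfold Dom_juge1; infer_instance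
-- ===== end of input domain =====

-- B replaces A's three substring checks plus index loop by one build-set-then-compare step (objective: simpler).

-- ===== PORT A =====
-- the 'for i in range(len(letters))' loop with its two early returns; the fall-through
-- after the loop (only reachable for an empty string, which the guard excludes) is False,
-- matching Python's falsy None there (never reached under the guard).
def juge1Loop (cs : List Char) (dic : PySem.Set Char) (i : Nat) : Bool :=
  if h : i < cs.length then
    if ¬ (PySem.Set.contains dic cs[i]) then false
    else if i == cs.length - 1 then true
    else juge1Loop cs dic (i + 1)
  else false
termination_by cs.length - i

def juge1 (letters : String) : Bool :=
  let dic : PySem.Set Char := PySem.Set.ofList ['P', 'A', 'T']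
  if PySem.Str.isIn "P" letters && PySem.Str.isIn "A" letters && PySem.Str.isIn "T" letters then
    juge1Loop letters.toList dic 0
  else false

-- ===== PORT B =====
def juge1_alt (letters : String) : Bool :=
  PySem.Set.equal (PySem.Set.ofList letters.toList) (PySem.Set.ofList ['P', 'A', 'T'])

-- ===== PRECONDITION & SPEC =====
def Spec_juge1 (letters : String) (out : Bool) : Prop := out = juge1_alt letters
instance (letters : String) (out : Bool) : Decidable (Spec_juge1 letters out) := by unfold Spec_juge1; infer_instance

-- ===== CLAIM (what is proved, stated in full; the proofs are below) =====
def Claim_equal_juge1 : Prop := ∀ (letters : String), Dom_juge1 letters → Spec_juge1 letters (juge1 letters)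

-- ===== LEMMAS AND PROOFS =====

theorem singleton_isIn (c : Char) (p s : String) (hc : p.toList = [c]) :
    PySem.Str.isIn p s = true ↔ c ∈ s.toList := by
  rw [PySem.Str.isIn_iff_infix, hc]
  constructor
  · intro h; exact h.sublist.subset (by simp)
  · intro h
    obtain ⟨l, r, hs⟩ := List.append_of_mem h
    exact ⟨l, r, by simp [hs]⟩

theorem juge1Loop_eq (cs : List Char) (dic : PySem.Set Char) (i : Nat) :
    juge1Loop cs dic i =
      (decide (i < cs.length) && (cs.drop i).all (fun c => PySem.Set.contains dic c)) := by
  fun_induction juge1Loop cs dic i with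
  | case1 i h hbad =>
    simp at hbad
    have hall : ((cs.drop i).all (fun c => PySem.Set.contains dic c)) = false := by
      refine List.all_eq_false.mpr ⟨cs[i], ?_, by simpa using hbad⟩
      rw [List.drop_eq_getElem_cons h]
      exact List.mem_cons_self
    rw [hall, Bool.and_false]
  | case2 i h hok hlast =>
    simp at hok hlast
    have hnil : cs.drop (i + 1) = [] := by
      apply List.drop_eq_nil_of_le; omega
    rw [List.drop_eq_getElem_cons h, hnil]
    simp [h, hok]
  | case3 i h hok hlast ih =>
    simp at hok hlast
    rw [ih]
    have h1 : i + 1 < cs.length := by omega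
    conv_rhs => rw [List.drop_eq_getElem_cons h]
    rw [List.all_cons]
    simp [h, h1, hok]
  | case4 i h => simp at h; simp [h]

-- ===== VERDICT (by name: the statement is the Claim_ definition above) =====
theorem juge1_spec : Claim_equal_juge1 := by
  intro letters _
  unfold Spec_juge1 juge1 juge1_alt
  simp only [juge1Loop_eq]
  have hP := singleton_isIn 'P' "P" letters (by simp)
  have hA := singleton_isIn 'A' "A" letters (by simp)
  have hT := singleton_isIn 'T' "T" letters (by simp)
  rw [Bool.eq_iff_iff, PySem.Set.equal_iff]
  constructor
  · intro hcond
    by_cases hg : (PySem.Str.isIn "P" letters && PySem.Str.isIn "A" letters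
        && PySem.Str.isIn "T" letters) = true
    · rw [if_pos hg] at hcond
      simp only [Bool.and_eq_true] at hg
      obtain ⟨⟨hp, ha⟩, ht⟩ := hg
      simp only [Bool.and_eq_true, List.all_eq_true, PySem.Set.contains_iff,
        decide_eq_true_eq] at hcond
      intro x
      simp only [PySem.Set.mem_ofList]
      constructor
      · exact fun hx => hcond.2 x hx
      · intro hx
        simp only [List.mem_cons, List.not_mem_nil, or_false] at hx
        rcases hx with rfl | rfl | rfl
        · exact hP.mp hp
        · exact hA.mp ha
        · exact hT.mp ht
    · rw [if_neg hg] at hcond; cases hcond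
  · intro hmem
    simp only [PySem.Set.mem_ofList] at hmem
    have hp : 'P' ∈ letters.toList := (hmem 'P').mpr (by simp)
    have ha : 'A' ∈ letters.toList := (hmem 'A').mpr (by simp)
    have ht : 'T' ∈ letters.toList := (hmem 'T').mpr (by simp)
    rw [if_pos (by rw [Bool.and_eq_true, Bool.and_eq_true]; exact ⟨⟨hP.mpr hp, hA.mpr ha⟩, hT.mpr ht⟩)]
    rw [List.drop_zero, Bool.and_eq_true]
    refine ⟨by simpa using List.length_pos_of_mem hp, ?_⟩
    simp only [List.all_eq_true, PySem.Set.contains_iff]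
    exact fun x hx => (PySem.Set.mem_ofList _ _).mpr ((hmem x).mp hx)
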